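-- pv_equiv track=rewrite | github.com/defranchis/DirectMtLHC | combTools.py | removeUselessCharachters
-- ===== SOURCE A (Python) =====
-- def removeUselessCharachters(name):
--     name = name.replace(' ','_')
--     if name.endswith('_'):
--         name = name[:-1]
--     if name.endswith('_'):
--         name = removeUselessCharachters(name)
--     if name.startswith('_'):
--         name = name[1:]
--     if name.startswith('_'):
--         name = removeUselessCharachters(name)
--     return name
-- ===== SOURCE B (Python) =====
-- def removeUselessCharachters(name):
--     return name.replace(' ', '_').strip('_')
-- ===== Notes on version B (the rewrite author's own statement) =====
-- stated objective: simpler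
-- what changed: Replaces A's recursive one-character-at-a-time end stripping (with redundant re-replacement of spaces on every recursive call) by a single expression: replace spaces by underscores once, then strip all leading/trailing underscores with one str.strip('_') call.
import Mathlib
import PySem

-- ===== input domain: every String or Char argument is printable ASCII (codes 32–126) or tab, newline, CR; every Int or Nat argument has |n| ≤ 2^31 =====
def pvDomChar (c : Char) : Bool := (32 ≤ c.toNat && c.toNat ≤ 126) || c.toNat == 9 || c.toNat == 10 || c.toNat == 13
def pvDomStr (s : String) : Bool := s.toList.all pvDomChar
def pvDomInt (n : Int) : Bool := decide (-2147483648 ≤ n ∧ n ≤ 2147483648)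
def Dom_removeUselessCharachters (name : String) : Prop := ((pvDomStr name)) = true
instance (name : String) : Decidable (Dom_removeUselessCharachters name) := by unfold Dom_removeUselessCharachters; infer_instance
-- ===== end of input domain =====

-- B replaces A's recursive one-end-character-at-a-time stripping (which re-runs the
-- space replacement on every recursive call) by replace-then-strip('_') in one expression (simpler).


-- ===== PORT A =====
-- A's recursion, transliterated on the code points (n1..n4 are the successive
-- reassignments of Python's `name`); the fuel argument only makes the recursion
-- structural — length + 1 steps always suffice (proved in aux_eq below).
def removeUselessCharachtersAux : Nat → List Char → List Char
  | 0, l => l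
  | fuel + 1, l =>
    let n1 := PySem.Chars.replace l [' '] ['_']
    let n2 := if PySem.Chars.endswith n1 ['_'] then PySem.Chars.slice n1 none (some (-1)) else n1
    let n3 := if PySem.Chars.endswith n2 ['_'] then removeUselessCharachtersAux fuel n2 else n2
    let n4 := if PySem.Chars.startswith n3 ['_'] then PySem.Chars.slice n3 (some 1) none else n3
    if PySem.Chars.startswith n4 ['_'] then removeUselessCharachtersAux fuel n4 else n4


def removeUselessCharachters (name : String) : String :=
  String.ofList (removeUselessCharachtersAux (name.toList.length + 1) name.toList)

-- ===== PORT B =====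
def removeUselessCharachters_alt (name : String) : String :=
  PySem.Str.stripChars (PySem.Str.replace name " " "_") "_"

-- ===== PRECONDITION & SPEC =====
def Spec_removeUselessCharachters (name : String) (out : String) : Prop := out = removeUselessCharachters_alt name
instance (name : String) (out : String) : Decidable (Spec_removeUselessCharachters name out) := by unfold Spec_removeUselessCharachters; infer_instance

-- ===== CLAIM (what is proved, stated in full; the proofs are below) =====
def Claim_equal_removeUselessCharachters : Prop := ∀ (name : String), Dom_removeUselessCharachters name → Spec_removeUselessCharachters name (removeUselessCharachters name)

-- ===== LEMMAS AND PROOFS =====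
def repc (c : Char) : Char := if c = ' ' then '_' else c
def pU : Char → Bool := fun c => decide (c = '_')
def stripU (l : List Char) : List Char := List.rdropWhile pU (List.dropWhile pU l)

theorem stripChars_eq (l : List Char) : PySem.Chars.stripChars l ['_'] = stripU l := by
  unfold stripU pU
  simp [PySem.Chars.stripChars, List.rdropWhile]

theorem go_single : ∀ (fuel : Nat) (l acc : List Char), l.length ≤ fuel →
    PySem.Chars.replace.go [' '] ['_'] fuel l acc = acc.reverse ++ l.map repc := by
  intro fuel
  induction fuel with
  | zero => intro l acc h; have : l = [] := by simpa using List.eq_nil_of_length_eq_zero (Nat.le_zero.mp h)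
            subst this; simp [PySem.Chars.replace.go]
  | succ f ih =>
    intro l acc h
    cases l with
    | nil => simp [PySem.Chars.replace.go]
    | cons c t =>
      have h' : t.length ≤ f := by simpa using h
      by_cases hc : c = ' '
      · subst hc; simp [PySem.Chars.replace.go, ih _ _ h', repc]
      · simp [PySem.Chars.replace.go, Ne.symm hc, ih _ _ h', repc, hc]

theorem replace_eq_map (l : List Char) : PySem.Chars.replace l [' '] ['_'] = l.map repc := by
  rw [PySem.Chars.replace]
  simp only [List.isEmpty_cons, Bool.false_eq_true, if_false]
  exact go_single l.length l [] le_rfl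

theorem no_space_map (l : List Char) : ' ' ∉ l.map repc := by
  simp only [List.mem_map, not_exists]
  rintro c ⟨-, hc⟩
  revert hc; unfold repc; split <;> simp_all
  
theorem map_repc_id (l : List Char) (h : ' ' ∉ l) : l.map repc = l := by
  induction l with
  | nil => rfl
  | cons c t ih =>
    simp only [List.mem_cons, not_or] at h
    simp [List.map_cons, repc, Ne.symm h.1, ih h.2]

theorem rdropWhile_cons' (p : Char → Bool) (c : Char) (t : List Char) :
    List.rdropWhile p (c :: t) = if (List.rdropWhile p t).isEmpty then List.rdropWhile p [c] else c :: List.rdropWhile p t := by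
  unfold List.rdropWhile
  rw [show (c :: t).reverse = t.reverse ++ [c] by simp]
  rw [List.dropWhile_append]
  by_cases h : (List.dropWhile p t.reverse).isEmpty
  · simp [h]
  · simp only [h, if_false]
    simp at h ⊢
    intro hall
    obtain ⟨x, hx, hpx⟩ := h
    rw [hall x hx] at hpx
    cases hpx

theorem commute (l : List Char) : List.dropWhile pU (List.rdropWhile pU l) = List.rdropWhile pU (List.dropWhile pU l) := by
  induction l with
  | nil => simp
  | cons c t ih =>
    rw [rdropWhile_cons']
    by_cases he : (List.rdropWhile pU t).isEmpty
    · have hall : ∀ x ∈ t, pU x = true := by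
        rw [← List.rdropWhile_eq_nil_iff]; simpa using he
      simp only [he, if_true, List.rdropWhile_singleton]
      by_cases hc : pU c = true
      · simp [hc, List.dropWhile_cons, List.dropWhile_eq_nil_iff.mpr hall]
      · simp only [hc, Bool.false_eq_true, if_false]
        simp only [List.dropWhile_cons, hc, Bool.false_eq_true, if_false]
        rw [rdropWhile_cons', List.rdropWhile_singleton]
        simp [he, hc]
    · simp only [he, if_false]
      by_cases hc : pU c = true
      · simp [List.dropWhile_cons, hc, ih]
      · simp only [List.dropWhile_cons, hc, Bool.false_eq_true, if_false]
        rw [rdropWhile_cons']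
        simp [he, hc]

theorem stripU_eq_comm (l : List Char) : stripU l = List.dropWhile pU (List.rdropWhile pU l) := by
  rw [stripU, commute]

theorem stripU_dropLast (l : List Char) (h : ['_'] <:+ l) : stripU l.dropLast = stripU l := by
  obtain ⟨t, rfl⟩ := h
  rw [stripU_eq_comm, stripU_eq_comm, List.dropLast_concat,
    List.rdropWhile_concat_pos _ _ _ (by simp [pU])]

theorem stripU_tail (l : List Char) (h : ['_'] <+: l) : stripU l.tail = stripU l := by
  obtain ⟨t, rfl⟩ := h
  show stripU t = stripU ('_' :: t)
  rw [stripU, stripU, List.dropWhile_cons_of_pos (by simp [pU])]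

theorem stripU_eq_self (l : List Char) (h1 : ¬ ['_'] <+: l) (h2 : ¬ ['_'] <:+ l) : stripU l = l := by
  have hd : List.dropWhile pU l = l := by
    cases l with
    | nil => rfl
    | cons c t =>
      have hc : ¬ pU c = true := by
        simp only [pU, decide_eq_true_eq]
        rintro rfl; exact h1 ⟨t, rfl⟩
      simp [List.dropWhile_cons, hc]
  rw [stripU, hd, List.rdropWhile_eq_self_iff]
  intro hl hp
  apply h2
  refine ⟨l.dropLast, ?_⟩
  have := List.dropLast_append_getLast hl
  rw [show l.getLast hl = '_' by simpa [pU] using hp] at this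
  exact this

theorem not_prefix_stripU (l : List Char) : ¬ ['_'] <+: stripU l := by
  rw [stripU_eq_comm]
  rintro ⟨t, ht⟩
  have hne : List.dropWhile pU (List.rdropWhile pU l) ≠ [] := by rw [← ht]; simp
  have h1 := List.head_dropWhile_not pU hne
  have h2 : (List.dropWhile pU (List.rdropWhile pU l)).head? = some '_' := by rw [← ht]; rfl
  rw [List.head?_eq_head hne] at h2
  rw [Option.some_inj.mp h2] at h1
  simp [pU] at h1

theorem not_suffix_tail (l : List Char) (h : ¬ ['_'] <:+ l) : ¬ ['_'] <:+ l.tail :=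
  fun hs => h (hs.trans (List.tail_suffix l))

theorem suffix_ne_nil {x : List Char} (h : ['_'] <:+ x) : x ≠ [] := by
  rintro rfl; simpa using h

theorem prefix_ne_nil {x : List Char} (h : ['_'] <+: x) : x ≠ [] := by
  rintro rfl; simpa using h

theorem lead_eq (fuel : Nat) (w : List Char) (hw : ' ' ∉ w) (hE : ¬ ['_'] <:+ w)
    (IH : ∀ l', l'.length < fuel → removeUselessCharachtersAux fuel l' = stripU (l'.map repc))
    (hlen : w.length ≤ fuel) :
    (if PySem.Chars.startswith (if PySem.Chars.startswith w ['_'] then PySem.Chars.slice w (some 1) none else w) ['_']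
     then removeUselessCharachtersAux fuel (if PySem.Chars.startswith w ['_'] then PySem.Chars.slice w (some 1) none else w)
     else (if PySem.Chars.startswith w ['_'] then PySem.Chars.slice w (some 1) none else w)) = stripU w := by
  have htail : PySem.Chars.slice w (some 1) none = w.tail := by
    simp [PySem.List.slice_from_one]
  by_cases hS : ['_'] <+: w
  · have sb : PySem.Chars.startswith w ['_'] = true := (PySem.Chars.startswith_iff _ _).mpr hS
    simp only [sb, if_true, htail]
    by_cases hS2 : ['_'] <+: w.tail
    · simp only [(PySem.Chars.startswith_iff _ _).mpr hS2, if_true]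
      have hwne : w ≠ [] := prefix_ne_nil hS
      have htne : w.tail ≠ [] := prefix_ne_nil hS2
      have hlt : w.tail.length < fuel := by
        have h2 : 2 ≤ w.length := by
          cases w with
          | nil => simp at hwne
          | cons a t => cases t with
            | nil => simp at htne
            | cons b u => simp
        have : w.tail.length = w.length - 1 := by simp
        omega
      rw [IH _ hlt, map_repc_id _ (fun hm => hw (List.tail_subset w hm)), stripU_tail _ hS]
    · have sb2 : PySem.Chars.startswith w.tail ['_'] = false := by
        rw [← Bool.not_eq_true]; exact fun h => hS2 ((PySem.Chars.startswith_iff _ _).mp h)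
      simp only [sb2, Bool.false_eq_true, if_false]
      rw [← stripU_tail _ hS, stripU_eq_self _ hS2 (not_suffix_tail _ hE)]
  · have sb : PySem.Chars.startswith w ['_'] = false := by
      rw [← Bool.not_eq_true]; exact fun h => hS ((PySem.Chars.startswith_iff _ _).mp h)
    simp only [sb, Bool.false_eq_true, if_false]
    rw [stripU_eq_self _ hS hE]

theorem aux_eq : ∀ (fuel : Nat) (l : List Char), l.length ≤ fuel →
    removeUselessCharachtersAux (fuel + 1) l = stripU (l.map repc) := by
  intro fuel
  induction fuel using Nat.strong_induction_on with
  | _ fuel IH =>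
    intro l hlen
    have IHfuel : ∀ l', l'.length < fuel → removeUselessCharachtersAux fuel l' = stripU (l'.map repc) := by
      intro l' hl'
      cases fuel with
      | zero => omega
      | succ f => exact IH f (Nat.lt_succ_self f) l' (by omega)
    simp only [removeUselessCharachtersAux, replace_eq_map]
    have hM : ' ' ∉ l.map repc := no_space_map l
    have hlem : (l.map repc).length ≤ fuel := by simpa using hlen
    have hdl : PySem.Chars.slice (l.map repc) none (some (-1)) = (l.map repc).dropLast := by
      simp [PySem.List.slice_to_neg_one]
    by_cases hE : ['_'] <:+ (l.map repc)
    · simp only [(PySem.Chars.endswith_iff _ _).mpr hE, if_true, hdl]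
      by_cases hE2 : ['_'] <:+ (l.map repc).dropLast
      · simp only [(PySem.Chars.endswith_iff _ _).mpr hE2, if_true]
        have hlt : (l.map repc).dropLast.length < fuel := by
          have : (l.map repc) ≠ [] := suffix_ne_nil hE
          have : 1 ≤ (l.map repc).length := List.length_pos_iff.mpr this
          simp; omega
        rw [IHfuel _ hlt, map_repc_id _ (fun hm => hM (List.dropLast_subset _ hm)),
          stripU_dropLast _ hE]
        have sb : PySem.Chars.startswith (stripU (l.map repc)) ['_'] = false := by
          rw [← Bool.not_eq_true]
          exact fun h => not_prefix_stripU _ ((PySem.Chars.startswith_iff _ _).mp h)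
        simp only [sb, Bool.false_eq_true, if_false]
      · have eb2 : PySem.Chars.endswith (l.map repc).dropLast ['_'] = false := by
          rw [← Bool.not_eq_true]; exact fun h => hE2 ((PySem.Chars.endswith_iff _ _).mp h)
        simp only [eb2, Bool.false_eq_true, if_false]
        rw [← stripU_dropLast _ hE]
        exact lead_eq fuel (l.map repc).dropLast
          (fun hm => hM (List.dropLast_subset _ hm)) hE2 IHfuel
          (by simp; omega)
    · have eb : PySem.Chars.endswith (l.map repc) ['_'] = false := by
        rw [← Bool.not_eq_true]; exact fun h => hE ((PySem.Chars.endswith_iff _ _).mp h)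
      simp only [eb, Bool.false_eq_true, if_false]
      exact lead_eq fuel (l.map repc) hM hE IHfuel hlem

-- ===== VERDICT (by name: the statement is the Claim_ definition above) =====
theorem removeUselessCharachters_spec : Claim_equal_removeUselessCharachters := by
  intro name _
  unfold Spec_removeUselessCharachters
  unfold removeUselessCharachters removeUselessCharachters_alt
  rw [aux_eq _ _ le_rfl]
  have hb : (PySem.Str.stripChars (PySem.Str.replace name " " "_") "_").toList
      = stripU (name.toList.map repc) := by
    rw [PySem.Str.toList_stripChars, PySem.Str.toList_replace]
    show PySem.Chars.stripChars (PySem.Chars.replace name.toList [' '] ['_']) ['_'] = _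
    rw [replace_eq_map, stripChars_eq]
  rw [← hb]
  exact String.ofList_toList
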